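-- pv_equiv track=rewrite | github.com/Guinga6/Transfer-Rumours-Analysis | youtube/final_step.py | parse_text_to_dict
-- ===== SOURCE A (Python) =====
-- def parse_text_to_dict(text):
--     entries = text.split('\n')
--     result = {}
--     current_key = None
--     current_value = []
--
--     for line in entries:
--         if ':' in line:
--             if current_key:
--                 result[current_key] = ' '.join(current_value).strip()
--             key, value = line.split(':', 1)
--             current_key = key.strip()
--             current_value = [value.strip()]
--         else:
--             current_value.append(line.strip())
--
--     if current_key:
--         result[current_key] = ' '.join(current_value).strip()
--
--     return result
-- ===== SOURCE B (Python) =====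
-- def parse_text_to_dict(text):
--     lines = text.split('\n')
--     n = len(lines)
--     i = 0
--     # skip everything before the first key line
--     while i < n and ':' not in lines[i]:
--         i += 1
--     result = {}
--     while i < n:
--         key, value = lines[i].split(':', 1)
--         i += 1
--         parts = [value.strip()]
--         while i < n and ':' not in lines[i]:
--             parts.append(lines[i].strip())
--             i += 1
--         if key.strip():
--             result[key.strip()] = ' '.join(parts).strip()
--     return result
-- ===== Notes on version B (the rewrite author's own statement) =====
-- stated objective: alternative
-- what changed: B replaces A's deferred-flush accumulator (current_key/current_value state flushed at the next colon line and after the loop) with a segment-at-a-time cursor parser: skip the prefix before the first colon line, then for each colon line consume its continuation lines in an inner loop and insert the finished entry immediately.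
import Mathlib
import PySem

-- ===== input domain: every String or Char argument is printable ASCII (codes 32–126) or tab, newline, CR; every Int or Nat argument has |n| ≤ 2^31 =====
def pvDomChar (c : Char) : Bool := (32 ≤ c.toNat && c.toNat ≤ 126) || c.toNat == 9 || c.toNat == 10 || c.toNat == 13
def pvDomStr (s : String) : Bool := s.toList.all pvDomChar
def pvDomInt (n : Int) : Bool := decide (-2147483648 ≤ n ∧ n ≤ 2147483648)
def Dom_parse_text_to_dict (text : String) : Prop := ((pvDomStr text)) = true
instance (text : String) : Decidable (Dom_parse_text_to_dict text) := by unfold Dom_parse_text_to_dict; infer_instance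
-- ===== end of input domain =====

-- B replaces A's deferred-flush accumulator with a segment-at-a-time cursor parser (same cost; equivalence proved below).

-- ===== PORT A =====
-- loop body of A: state = (result, current_key, current_value); current_key = none is Python's None
def pvStepA (s : PySem.Dict String String × Option String × List String) (line : String) :
    PySem.Dict String String × Option String × List String :=
  if PySem.Str.isIn ":" line then
    let result := match s.2.1 with
      | some k => if k ≠ "" then s.1.insert k (PySem.Str.strip (PySem.Str.join " " s.2.2)) else s.1
      | none => s.1
    match PySem.Str.splitMax? line ":" 1 with
    | some (k :: v :: _) => (result, some (PySem.Str.strip k), [PySem.Str.strip v])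
    | _ => (result, s.2.1, s.2.2)   -- unreachable: line contains ':' so split has two parts
  else (s.1, s.2.1, s.2.2 ++ [PySem.Str.strip line])

def parse_text_to_dict (text : String) : List (String × String) :=
  let entries := (PySem.Str.split? text "\n").getD []   -- sep "\n" ≠ "", so split? is always some
  let st := entries.foldl pvStepA (PySem.Dict.empty, none, [])
  (match st.2.1 with
   | some k => if k ≠ "" then st.1.insert k (PySem.Str.strip (PySem.Str.join " " st.2.2)) else st.1
   | none => st.1).items

-- ===== PORT B =====
-- first while: skip lines before the first colon line
def pvSkipB : List String → List String
  | [] => []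
  | l :: ls => if PySem.Str.isIn ":" l then l :: ls else pvSkipB ls

-- inner while: collect stripped continuation lines, return them with the rest
def pvBodyB : List String → List String × List String
  | [] => ([], [])
  | l :: ls => if PySem.Str.isIn ":" l then ([], l :: ls)
               else ((PySem.Str.strip l) :: (pvBodyB ls).1, (pvBodyB ls).2)

theorem pvBodyB_len : ∀ (ls : List String), (pvBodyB ls).2.length ≤ ls.length
  | [] => Nat.le_refl _
  | l :: ls => by
    unfold pvBodyB
    cases hc : PySem.Str.isIn ":" l with
    | true => exact Nat.le_refl _
    | false => exact Nat.le_succ_of_le (pvBodyB_len ls)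

-- outer while: one iteration per colon line
def pvMainB : List String → PySem.Dict String String → PySem.Dict String String
  | [], result => result
  | l :: ls, result =>
    match PySem.Str.splitMax? l ":" 1 with
    | some (k :: v :: _) =>
        let parts := PySem.Str.strip v :: (pvBodyB ls).1
        let result := if PySem.Str.strip k ≠ "" then
            result.insert (PySem.Str.strip k) (PySem.Str.strip (PySem.Str.join " " parts))
          else result
        pvMainB (pvBodyB ls).2 result
    | _ => result   -- unreachable: the head of the list always contains ':'
  termination_by ls _ => ls.length
  decreasing_by exact Nat.lt_succ_of_le (pvBodyB_len ls)

def parse_text_to_dict_alt (text : String) : List (String × String) :=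
  (pvMainB (pvSkipB ((PySem.Str.split? text "\n").getD [])) PySem.Dict.empty).items

-- ===== PRECONDITION & SPEC =====
def Spec_parse_text_to_dict (text : String) (out : List (String × String)) : Prop := out = parse_text_to_dict_alt text
instance (text : String) (out : List (String × String)) : Decidable (Spec_parse_text_to_dict text out) := by unfold Spec_parse_text_to_dict; infer_instance

-- ===== CLAIM (what is proved, stated in full; the proofs are below) =====
def Claim_equal_parse_text_to_dict : Prop := ∀ (text : String), Dom_parse_text_to_dict text → Spec_parse_text_to_dict text (parse_text_to_dict text)

-- ===== LEMMAS AND PROOFS =====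

-- A's after-the-loop flush, as a function of the loop state
def pvFlush (st : PySem.Dict String String × Option String × List String) : PySem.Dict String String :=
  match st.2.1 with
  | some k => if k ≠ "" then st.1.insert k (PySem.Str.strip (PySem.Str.join " " st.2.2)) else st.1
  | none => st.1

-- B's conditional insert
def pvIns (d : PySem.Dict String String) (k : String) (parts : List String) : PySem.Dict String String :=
  if k ≠ "" then d.insert k (PySem.Str.strip (PySem.Str.join " " parts)) else d

theorem pv_go_zero (fuel : Nat) (l cur : List Char) (acc : List (List Char)) :
    PySem.Chars.splitOnMax.go [':'] fuel 0 l cur acc = ((cur.reverse ++ l) :: acc).reverse := by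
  cases fuel with
  | zero => simp [PySem.Chars.splitOnMax.go]
  | succ f => cases l with
    | nil => simp [PySem.Chars.splitOnMax.go]
    | cons c rest => simp [PySem.Chars.splitOnMax.go]

theorem pv_go_one (fuel : Nat) : ∀ (l cur : List Char) (acc : List (List Char)),
    l.length < fuel → ':' ∈ l →
    ∃ a b, PySem.Chars.splitOnMax.go [':'] fuel 1 l cur acc = acc.reverse ++ [a, b] := by
  induction fuel with
  | zero => intro l cur acc h; exact absurd h (Nat.not_lt_zero _)
  | succ f ih =>
    intro l cur acc hlen hmem
    cases l with
    | nil => simp at hmem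
    | cons c rest =>
      by_cases hc : c = ':'
      · subst hc
        refine ⟨cur.reverse, rest, ?_⟩
        simp [PySem.Chars.splitOnMax.go, List.isPrefixOf, pv_go_zero]
      · have hmem' : ':' ∈ rest := by
          rcases List.mem_cons.mp hmem with h | h
          · exact absurd h.symm hc
          · exact h
        have hpre : List.isPrefixOf [':'] (c :: rest) = false := by
          simp [List.isPrefixOf]
          exact fun h => hc h.symm
        obtain ⟨a, b, hab⟩ := ih rest (c :: cur) acc (by simpa using Nat.lt_of_succ_lt_succ hlen) hmem'
        refine ⟨a, b, ?_⟩
        simpa [PySem.Chars.splitOnMax.go, hpre] using hab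

theorem pv_split_colon (s : String) (h : PySem.Str.isIn ":" s = true) :
    ∃ k v, PySem.Str.splitMax? s ":" 1 = some [k, v] := by
  have hmem : ':' ∈ s.toList := by
    have hinf := (PySem.Str.isIn_iff_infix ":" s).mp h
    exact hinf.subset (by simp)
  obtain ⟨a, b, hab⟩ := pv_go_one (s.toList.length + 1) s.toList [] [] (Nat.lt_succ_self _) hmem
  rw [String.length_toList] at hab
  refine ⟨String.ofList a, String.ofList b, ?_⟩
  simp [PySem.Str.splitMax?, PySem.Chars.splitMax?, PySem.Chars.splitOnMax, hab]

theorem pvP : ∀ (ls : List String) (d : PySem.Dict String String) (k : String) (cv : List String),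
    pvFlush (ls.foldl pvStepA (d, some k, cv)) =
      pvMainB (pvBodyB ls).2 (pvIns d k (cv ++ (pvBodyB ls).1))
  | [], d, k, cv => by
    simp only [List.foldl_nil, pvBodyB, List.append_nil, pvMainB]
    rfl
  | l :: ls, d, k, cv => by
    rw [List.foldl_cons]
    cases hc : PySem.Str.isIn ":" l with
    | true =>
      obtain ⟨k', v', hsp⟩ := pv_split_colon l hc
      have hstep : pvStepA (d, some k, cv) l
          = (pvIns d k cv, some (PySem.Str.strip k'), [PySem.Str.strip v']) := by
        unfold pvStepA; rw [hc, hsp]; rfl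
      have hbody : pvBodyB (l :: ls) = ([], l :: ls) := by
        unfold pvBodyB; rw [hc]; rfl
      rw [hstep, pvP ls (pvIns d k cv) (PySem.Str.strip k') [PySem.Str.strip v'], hbody]
      have hmain : pvMainB (l :: ls) (pvIns d k (cv ++ ([], l :: ls).1))
          = pvMainB (pvBodyB ls).2
              (pvIns (pvIns d k cv) (PySem.Str.strip k')
                ([PySem.Str.strip v'] ++ (pvBodyB ls).1)) := by
        rw [pvMainB]; rw [hsp]
        simp only [List.append_nil, List.singleton_append]
        rfl
      rw [hmain]
    | false =>
      have hstep : pvStepA (d, some k, cv) l = (d, some k, cv ++ [PySem.Str.strip l]) := by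
        unfold pvStepA; rw [hc]; rfl
      have hbody : pvBodyB (l :: ls)
          = (PySem.Str.strip l :: (pvBodyB ls).1, (pvBodyB ls).2) := by
        conv_lhs => rw [pvBodyB.eq_def]
        simp only [hc]
        rfl
      rw [hstep, pvP ls d k (cv ++ [PySem.Str.strip l]), hbody]
      simp only [List.append_assoc, List.singleton_append]

theorem pvN : ∀ (ls : List String) (d : PySem.Dict String String) (cv : List String),
    pvFlush (ls.foldl pvStepA (d, none, cv)) = pvMainB (pvSkipB ls) d
  | [], d, cv => by
    rw [List.foldl_nil]
    show d = pvMainB (pvSkipB []) d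
    rw [pvSkipB, pvMainB]
  | l :: ls, d, cv => by
    rw [List.foldl_cons]
    cases hc : PySem.Str.isIn ":" l with
    | true =>
      obtain ⟨k', v', hsp⟩ := pv_split_colon l hc
      have hstep : pvStepA (d, none, cv) l
          = (d, some (PySem.Str.strip k'), [PySem.Str.strip v']) := by
        unfold pvStepA; rw [hc, hsp]; rfl
      have hskip : pvSkipB (l :: ls) = l :: ls := by
        unfold pvSkipB; rw [hc]; rfl
      rw [hstep, pvP ls d (PySem.Str.strip k') [PySem.Str.strip v'], hskip]
      have hmain : pvMainB (l :: ls) d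
          = pvMainB (pvBodyB ls).2
              (pvIns d (PySem.Str.strip k') ([PySem.Str.strip v'] ++ (pvBodyB ls).1)) := by
        rw [pvMainB]; rw [hsp]
        simp only [List.singleton_append]
        rfl
      rw [hmain]
    | false =>
      have hstep : pvStepA (d, none, cv) l = (d, none, cv ++ [PySem.Str.strip l]) := by
        unfold pvStepA; rw [hc]; rfl
      have hskip : pvSkipB (l :: ls) = pvSkipB ls := by
        conv_lhs => rw [pvSkipB.eq_def]
        simp only [hc]
        rfl
      rw [hstep, pvN ls d (cv ++ [PySem.Str.strip l]), hskip]

-- ===== VERDICT (by name: the statement is the Claim_ definition above) =====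
theorem parse_text_to_dict_spec : Claim_equal_parse_text_to_dict := by
  intro text _
  show parse_text_to_dict text = parse_text_to_dict_alt text
  exact congrArg PySem.Dict.items
    (pvN ((PySem.Str.split? text "\n").getD []) PySem.Dict.empty [])
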